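-- pv_equiv track=rewrite | github.com/bheil123/crossplay | lookahead.py | _limit_blanks
-- ===== SOURCE A (Python) =====
-- def _limit_blanks(tiles: str, max_blanks: int = 1) -> str:
--     """
--     Limit the number of blanks in a tile string.
--
--     Move generation with 2+ blanks is extremely slow (exponential).
--     For practical 2-ply lookahead, we cap blanks.
--
--     Args:
--         tiles: Tile string (may contain '?' for blanks)
--         max_blanks: Maximum blanks to keep (default 1)
--
--     Returns:
--         Tile string with excess blanks removed
--     """
--     blank_count = tiles.count('?')
--     if blank_count <= max_blanks:
--         return tiles
--
--     # Remove excess blanks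
--     result = []
--     blanks_kept = 0
--     for c in tiles:
--         if c == '?':
--             if blanks_kept < max_blanks:
--                 result.append(c)
--                 blanks_kept += 1
--             # else: skip this blank
--         else:
--             result.append(c)
--
--     return ''.join(result)
-- ===== SOURCE B (Python) =====
-- def _limit_blanks(tiles: str, max_blanks: int = 1) -> str:
--     """Cap the number of '?' blanks via split/join instead of a per-character loop."""
--     parts = tiles.split('?')
--     if len(parts) - 1 <= max_blanks:
--         return tiles
--     keep = max(max_blanks, 0)
--     return '?'.join(parts[:keep + 1]) + ''.join(parts[keep + 1:])
-- ===== Notes on version B (the rewrite author's own statement) =====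
-- stated objective: simpler
-- what changed: Replaces A's per-character loop with an explicit kept-blanks counter by one delimiter split on the blank marker followed by rejoining the first max_blanks+1 segments with the marker and concatenating the remaining segments.
import Mathlib
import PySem

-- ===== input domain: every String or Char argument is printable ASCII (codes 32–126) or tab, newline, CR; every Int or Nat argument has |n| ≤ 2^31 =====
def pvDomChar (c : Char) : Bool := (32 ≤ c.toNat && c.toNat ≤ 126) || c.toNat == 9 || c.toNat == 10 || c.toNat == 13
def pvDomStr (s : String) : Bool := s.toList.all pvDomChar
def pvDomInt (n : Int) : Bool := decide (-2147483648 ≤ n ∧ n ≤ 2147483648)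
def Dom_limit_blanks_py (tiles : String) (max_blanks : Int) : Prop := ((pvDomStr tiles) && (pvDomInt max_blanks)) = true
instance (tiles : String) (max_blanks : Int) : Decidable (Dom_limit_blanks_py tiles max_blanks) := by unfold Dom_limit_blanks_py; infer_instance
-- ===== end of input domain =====

-- B replaces A's per-character counting loop by a '?'-split followed by two joins (simpler decomposition, same cost).

-- ===== PORT A =====
def limit_blanks_py (tiles : String) (max_blanks : Int) : String :=
  let blank_count : Int := (PySem.Str.count tiles "?" : Int)
  if blank_count ≤ max_blanks then tiles
  else
    -- for c in tiles: append / count blanks, state = (result, blanks_kept)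
    let st := tiles.toList.foldl
      (fun (st : List Char × Int) c =>
        if c = '?' then
          if st.2 < max_blanks then (st.1 ++ [c], st.2 + 1) else st
        else (st.1 ++ [c], st.2)) (([] : List Char), (0 : Int))
    -- ''.join(result), result a list of one-character strings
    String.mk (PySem.Chars.join [] (st.1.map (fun c => [c])))

-- ===== PORT B =====
def limit_blanks_py_alt (tiles : String) (max_blanks : Int) : String :=
  let parts := PySem.Chars.splitOn tiles.toList ['?']
  if (parts.length : Int) - 1 ≤ max_blanks then tiles
  else
    let keep := max max_blanks 0
    -- parts[:keep+1] / parts[keep+1:] with keep+1 ≥ 1: take/drop are exact for this nonnegative in-bounds-or-clamped slice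
    String.mk (PySem.Chars.join ['?'] (parts.take (keep + 1).toNat)
      ++ PySem.Chars.join [] (parts.drop (keep + 1).toNat))

-- ===== PRECONDITION & SPEC =====
def Spec_limit_blanks_py (tiles : String) (max_blanks : Int) (out : String) : Prop := out = limit_blanks_py_alt tiles max_blanks
instance (tiles : String) (max_blanks : Int) (out : String) : Decidable (Spec_limit_blanks_py tiles max_blanks out) := by unfold Spec_limit_blanks_py; infer_instance

-- ===== CLAIM (what is proved, stated in full; the proofs are below) =====
def Claim_equal_limit_blanks_py : Prop := ∀ (tiles : String) (max_blanks : Int), Dom_limit_blanks_py tiles max_blanks → Spec_limit_blanks_py tiles max_blanks (limit_blanks_py tiles max_blanks)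

-- ===== LEMMAS AND PROOFS =====

/-- Structural recursion equivalent of `splitOn · ['?']`. -/
def splitQ : List Char → List (List Char)
  | [] => [[]]
  | c :: cs =>
    if c = '?' then [] :: splitQ cs
    else
      match splitQ cs with
      | [] => [[c]]
      | p :: ps => (c :: p) :: ps

/-- The common value of both programs' "remove excess blanks" phase:
keep the first `n` blanks, drop the rest, keep everything else. -/
def gKeep : List Char → Nat → List Char
  | [], _ => []
  | c :: cs, n =>
    if c = '?' then
      match n with
      | 0 => gKeep cs 0
      | Nat.succ n' => '?' :: gKeep cs n'
    else c :: gKeep cs n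

theorem splitQ_ne_nil (cs : List Char) : splitQ cs ≠ [] := by
  cases cs with
  | nil => simp [splitQ]
  | cons c cs =>
    simp only [splitQ]
    split
    · simp
    · cases h : splitQ cs <;> simp

theorem count_go_spec (fuel : Nat) (l : List Char) (acc : Nat) (h : l.length ≤ fuel) :
    PySem.Chars.count.go ['?'] fuel l acc = acc + l.count '?' := by
  induction fuel generalizing l acc with
  | zero =>
    interval_cases hl : l.length
    cases l with
    | nil => simp [PySem.Chars.count.go]
    | cons c cs => simp at hl
  | succ fuel ih =>
    cases l with
    | nil => simp [PySem.Chars.count.go]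
    | cons c cs =>
      simp only [PySem.Chars.count.go]
      by_cases hc : c = '?'
      · subst hc
        rw [if_pos (by simp [List.isPrefixOf])]
        simp only [List.length_cons, List.length_nil, List.drop_succ_cons, List.drop_zero]
        rw [ih cs (acc + 1) (by simpa using h)]
        simp
        omega
      · rw [if_neg (by simp [List.isPrefixOf]; intro hh; exact hc hh.symm)]
        rw [ih cs acc (by simpa using h)]
        simp [hc]

theorem count_q (cs : List Char) : PySem.Chars.count cs ['?'] = cs.count '?' := by
  simpa [PySem.Chars.count] using count_go_spec cs.length cs 0 le_rfl

theorem split_go_spec (fuel : Nat) (l cur : List Char) (acc : List (List Char))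
    (h : l.length ≤ fuel) :
    PySem.Chars.splitOn.go ['?'] fuel l cur acc
      = acc.reverse ++ (splitQ l).modifyHead (cur.reverse ++ ·) := by
  induction fuel generalizing l cur acc with
  | zero =>
    have : l = [] := List.length_eq_zero_iff.mp (Nat.le_zero.mp h)
    subst this
    simp [PySem.Chars.splitOn.go, splitQ]
  | succ fuel ih =>
    cases l with
    | nil => simp [PySem.Chars.splitOn.go, splitQ]
    | cons c cs =>
      by_cases hc : c = '?'
      · subst hc
        show PySem.Chars.splitOn.go ['?'] (fuel + 1) ('?' :: cs) cur acc = _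
        rw [show PySem.Chars.splitOn.go ['?'] (fuel + 1) ('?' :: cs) cur acc
            = PySem.Chars.splitOn.go ['?'] fuel (List.drop 1 ('?' :: cs)) [] (cur.reverse :: acc) from by
          simp [PySem.Chars.splitOn.go, List.isPrefixOf]]
        rw [List.drop_succ_cons, List.drop_zero, ih cs [] (cur.reverse :: acc) (by simpa using h)]
        simp only [splitQ, List.reverse_cons, List.reverse_nil, List.nil_append,
          List.modifyHead]
        cases hs : splitQ cs with
        | nil => exact absurd hs (splitQ_ne_nil cs)
        | cons p ps => simp
      · rw [show PySem.Chars.splitOn.go ['?'] (fuel + 1) (c :: cs) cur acc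
            = PySem.Chars.splitOn.go ['?'] fuel cs (c :: cur) acc from by
          simp only [PySem.Chars.splitOn.go]
          rw [if_neg (by simp [List.isPrefixOf]; intro hh; exact hc hh.symm)]]
        rw [ih cs (c :: cur) acc (by simpa using h)]
        simp only [splitQ, if_neg hc]
        cases hs : splitQ cs with
        | nil => exact absurd hs (splitQ_ne_nil cs)
        | cons p ps => simp

theorem splitOn_eq_splitQ (cs : List Char) : PySem.Chars.splitOn cs ['?'] = splitQ cs := by
  rw [show PySem.Chars.splitOn cs ['?'] = PySem.Chars.splitOn.go ['?'] (cs.length + 1) cs [] [] from by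
    simp [PySem.Chars.splitOn]]
  rw [split_go_spec (cs.length + 1) cs [] [] (Nat.le_succ _)]
  cases hs : splitQ cs with
  | nil => exact absurd hs (splitQ_ne_nil cs)
  | cons p ps => simp [List.modifyHead]

theorem length_splitQ (cs : List Char) : (splitQ cs).length = cs.count '?' + 1 := by
  induction cs with
  | nil => simp [splitQ]
  | cons c cs ih =>
    simp only [splitQ]
    by_cases hc : c = '?'
    · subst hc; simp [ih]
    · rw [if_neg hc]
      cases hs : splitQ cs with
      | nil => exact absurd hs (splitQ_ne_nil cs)
      | cons p ps =>
        rw [hs] at ih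
        simp [hc]
        simp at ih
        omega

theorem join_cons_head (sep c : Char) (p : List Char) (xs : List (List Char)) :
    PySem.Chars.join [sep] ((c :: p) :: xs) = c :: PySem.Chars.join [sep] (p :: xs) := by
  cases xs with
  | nil => simp [PySem.Chars.join_singleton]
  | cons q rest => rw [PySem.Chars.join_cons_cons, PySem.Chars.join_cons_cons]; simp

theorem join_nil_cons_head (c : Char) (p : List Char) (xs : List (List Char)) :
    PySem.Chars.join [] ((c :: p) :: xs) = c :: PySem.Chars.join [] (p :: xs) := by
  cases xs with
  | nil => simp [PySem.Chars.join_singleton]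
  | cons q rest => rw [PySem.Chars.join_cons_cons, PySem.Chars.join_cons_cons]; simp

theorem join_nil_splitQ (cs : List Char) : PySem.Chars.join [] (splitQ cs) = gKeep cs 0 := by
  induction cs with
  | nil => simp [splitQ, gKeep, PySem.Chars.join_singleton]
  | cons c cs ih =>
    simp only [splitQ, gKeep]
    by_cases hc : c = '?'
    · subst hc
      rw [if_pos rfl, if_pos rfl]
      cases hs : splitQ cs with
      | nil => exact absurd hs (splitQ_ne_nil cs)
      | cons p ps =>
        rw [PySem.Chars.join_cons_cons]
        rw [hs] at ih
        simpa using ih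
    · rw [if_neg hc, if_neg hc]
      cases hs : splitQ cs with
      | nil => exact absurd hs (splitQ_ne_nil cs)
      | cons p ps =>
        show PySem.Chars.join [] ((c :: p) :: ps) = c :: gKeep cs 0
        rw [join_nil_cons_head]
        rw [hs] at ih
        rw [ih]

theorem join_take_drop (cs : List Char) (n : Nat) :
    PySem.Chars.join ['?'] ((splitQ cs).take (n + 1))
      ++ PySem.Chars.join [] ((splitQ cs).drop (n + 1)) = gKeep cs n := by
  induction cs generalizing n with
  | nil => simp [splitQ, gKeep, PySem.Chars.join_singleton, PySem.Chars.join_nil]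
  | cons c cs ih =>
    simp only [splitQ, gKeep]
    by_cases hc : c = '?'
    · subst hc
      rw [if_pos rfl, if_pos rfl]
      cases n with
      | zero =>
        simp only [List.take_succ_cons, List.take_zero, List.drop_succ_cons, List.drop_zero]
        rw [PySem.Chars.join_singleton]
        simpa using join_nil_splitQ cs
      | succ n' =>
        cases hs : splitQ cs with
        | nil => exact absurd hs (splitQ_ne_nil cs)
        | cons p ps =>
          show PySem.Chars.join ['?'] (List.take (n' + 1 + 1) ([] :: p :: ps)) ++
              PySem.Chars.join [] (List.drop (n' + 1 + 1) ([] :: p :: ps)) = '?' :: gKeep cs n'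
          simp only [List.take_succ_cons, List.drop_succ_cons]
          rw [PySem.Chars.join_cons_cons]
          have hih := ih n'
          rw [hs] at hih
          simp only [List.take_succ_cons, List.drop_succ_cons] at hih
          simp only [List.nil_append, List.cons_append] at *
          rw [hih]
    · rw [if_neg hc, if_neg hc]
      cases hs : splitQ cs with
      | nil => exact absurd hs (splitQ_ne_nil cs)
      | cons p ps =>
        show PySem.Chars.join ['?'] (List.take (n + 1) ((c :: p) :: ps)) ++
            PySem.Chars.join [] (List.drop (n + 1) ((c :: p) :: ps)) = c :: gKeep cs n
        simp only [List.take_succ_cons, List.drop_succ_cons]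
        rw [join_cons_head]
        have hih := ih n
        rw [hs] at hih
        simp only [List.take_succ_cons, List.drop_succ_cons] at hih
        simp only [List.cons_append]
        rw [hih]

theorem foldl_gKeep (m : Int) (cs : List Char) (acc : List Char) (k : Int) :
    (cs.foldl
      (fun (st : List Char × Int) c =>
        if c = '?' then
          if st.2 < m then (st.1 ++ [c], st.2 + 1) else st
        else (st.1 ++ [c], st.2)) (acc, k)).1 = acc ++ gKeep cs (m - k).toNat := by
  induction cs generalizing acc k with
  | nil => simp [gKeep]
  | cons c cs ih =>
    simp only [List.foldl_cons, gKeep]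
    by_cases hc : c = '?'
    · subst hc
      rw [if_pos rfl, if_pos rfl]
      by_cases hk : k < m
      · rw [if_pos hk]
        have h1 : (m - k).toNat = ((m - (k + 1)).toNat) + 1 := by omega
        rw [h1, ih]
        simp
      · rw [if_neg hk]
        have h0 : (m - k).toNat = 0 := by omega
        rw [ih, h0]
    · rw [if_neg hc, if_neg hc, ih]
      simp

-- ===== VERDICT (by name: the statement is the Claim_ definition above) =====
theorem limit_blanks_py_spec : Claim_equal_limit_blanks_py := by
  intro tiles m _
  show limit_blanks_py tiles m = limit_blanks_py_alt tiles m
  unfold limit_blanks_py limit_blanks_py_alt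
  simp only [PySem.Str.count_eq, splitOn_eq_splitQ, length_splitQ]
  rw [show ("?".toList) = ['?'] from rfl, count_q]
  have hcond : ((tiles.toList.count '?' : Int) ≤ m) ↔ (((tiles.toList.count '?' + 1 : Nat) : Int) - 1 ≤ m) := by
    constructor <;> intro h <;> [push_cast; push_cast at h] <;> omega
  by_cases h : (tiles.toList.count '?' : Int) ≤ m
  · rw [if_pos h, if_pos (hcond.mp h)]
  · rw [if_neg h, if_neg (fun hh => h (hcond.mpr hh))]
    rw [foldl_gKeep m tiles.toList [] 0]
    rw [PySem.Chars.join_nil_singletons]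
    have hk : (max m 0 + 1).toNat = (m - 0).toNat + 1 := by omega
    rw [hk]
    rw [join_take_drop tiles.toList (m - 0).toNat]
    simp
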